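-- pv_equiv track=rewrite | github.com/lazydancer/advent-of-code | 2018/Day 18/main.py | countSolution
-- ===== SOURCE A (Python) =====
-- def countSolution(state):
--   woodedAreas = 0
--   lumberyards = 0
--   for line in state:
--     for char in line:
--       if char == '|':
--         woodedAreas += 1
--       elif char == '#':
--         lumberyards += 1
--
--   return woodedAreas * lumberyards
-- ===== SOURCE B (Python) =====
-- def countSolution(state):
--   s = ''.join(state)
--   def removedLen(c):
--     return len(s) - len(s.replace(c, ''))
--   return removedLen('|') * removedLen('#')
-- ===== Notes on version B (the rewrite author's own statement) =====
-- stated objective: alternative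
-- what changed: No counters or per-character branching: B joins the grid into one string and computes each occurrence count as the length drop after deleting that character with str.replace (delete-and-measure), then multiplies the two drops.
import Mathlib
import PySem

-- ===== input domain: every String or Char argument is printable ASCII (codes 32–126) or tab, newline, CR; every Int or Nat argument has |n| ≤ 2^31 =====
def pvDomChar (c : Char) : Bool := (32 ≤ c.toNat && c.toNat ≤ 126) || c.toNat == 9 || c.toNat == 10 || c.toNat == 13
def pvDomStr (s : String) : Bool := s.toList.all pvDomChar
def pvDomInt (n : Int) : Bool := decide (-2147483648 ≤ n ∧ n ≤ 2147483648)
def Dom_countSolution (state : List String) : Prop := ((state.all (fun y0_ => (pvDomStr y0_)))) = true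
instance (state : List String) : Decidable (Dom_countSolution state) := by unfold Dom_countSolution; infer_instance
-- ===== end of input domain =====

-- B uses no counters at all: it joins the grid and measures how much shorter the string
-- gets when each target character is deleted with str.replace (delete-and-measure).

-- ===== PORT A =====
def pvStepA (acc : Int × Int) (char : Char) : Int × Int :=
  if char == '|' then (acc.1 + 1, acc.2)
  else if char == '#' then (acc.1, acc.2 + 1)
  else acc

def countSolution (state : List String) : Int :=
  let p := state.foldl (fun acc line => line.toList.foldl pvStepA acc) (0, 0)
  p.1 * p.2

-- ===== PORT B =====
def pvRemovedLen (s : String) (c : String) : Int :=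
  PySem.Str.len s - PySem.Str.len (PySem.Str.replace s c "")

def countSolution_alt (state : List String) : Int :=
  let s := PySem.Str.join "" state
  pvRemovedLen s "|" * pvRemovedLen s "#"

-- ===== PRECONDITION & SPEC =====
def Spec_countSolution (state : List String) (out : Int) : Prop := out = countSolution_alt state
instance (state : List String) (out : Int) : Decidable (Spec_countSolution state out) := by unfold Spec_countSolution; infer_instance

-- ===== CLAIM (what is proved, stated in full; the proofs are below) =====
def Claim_equal_countSolution : Prop := ∀ (state : List String), Dom_countSolution state → Spec_countSolution state (countSolution state)

-- ===== LEMMAS AND PROOFS =====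

-- A's inner character loop counts '|' and '#'.
theorem countSolution_inner (cs : List Char) (w l : Int) :
    cs.foldl pvStepA (w, l) = (w + cs.count '|', l + cs.count '#') := by
  induction cs generalizing w l with
  | nil => simp
  | cons c cs ih =>
    rw [List.foldl_cons]
    by_cases h1 : c = '|'
    · subst h1
      rw [show pvStepA (w, l) '|' = (w + 1, l) from rfl, ih]
      simp [Prod.ext_iff]; omega
    · by_cases h2 : c = '#'
      · subst h2
        rw [show pvStepA (w, l) '#' = (w, l + 1) from rfl, ih]
        simp [Prod.ext_iff]; omega
      · rw [show pvStepA (w, l) c = (w, l) from by simp [pvStepA, h1, h2], ih]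
        simp [h1, h2]

-- A's outer loop counts over the flattened grid.
theorem countSolution_outer (state : List String) (w l : Int) :
    state.foldl (fun acc line => line.toList.foldl pvStepA acc) (w, l)
    = (w + (state.flatMap String.toList).count '|',
       l + (state.flatMap String.toList).count '#') := by
  induction state generalizing w l with
  | nil => simp
  | cons s ss ih =>
    rw [List.foldl_cons, countSolution_inner, ih]
    simp only [List.flatMap_cons, List.count_append, Prod.ext_iff]
    constructor <;> push_cast <;> ring

-- Single-character replace with "" filters the character out.
theorem replace_go_single (ch : Char) (fuel : Nat) (l acc : List Char)
    (h : l.length ≤ fuel) :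
    PySem.Chars.replace.go [ch] [] fuel l acc
      = acc.reverse ++ l.filter (fun c => c ≠ ch) := by
  induction fuel generalizing l acc with
  | zero =>
    interval_cases hl : l.length
    simp at hl; subst hl; simp [PySem.Chars.replace.go]
  | succ n ih =>
    cases l with
    | nil => simp [PySem.Chars.replace.go]
    | cons c t =>
      by_cases hc : c = ch
      · subst hc
        rw [show PySem.Chars.replace.go [c] [] (n+1) (c :: t) acc
              = PySem.Chars.replace.go [c] [] n t acc from by
            simp [PySem.Chars.replace.go, List.isPrefixOf]]
        rw [ih t acc (by simpa using Nat.lt_succ_iff.mp (by simpa using h))]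
        simp
      · rw [show PySem.Chars.replace.go [ch] [] (n+1) (c :: t) acc
              = PySem.Chars.replace.go [ch] [] n t (c :: acc) from by
            simp only [PySem.Chars.replace.go, List.isPrefixOf]
            simp only [Bool.and_eq_true, beq_iff_eq]
            rw [if_neg (by intro hp; exact hc hp.1.symm)]]
        rw [ih t (c :: acc) (by simpa using Nat.lt_succ_iff.mp (by simpa using h))]
        simp [hc]

theorem replace_single (s : List Char) (ch : Char) :
    PySem.Chars.replace s [ch] [] = s.filter (fun c => c ≠ ch) := by
  rw [PySem.Chars.replace]
  simp [replace_go_single ch s.length s [] (le_refl _)]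

theorem filter_ne_length (l : List Char) (ch : Char) :
    (l.filter (fun c => c ≠ ch)).length + l.count ch = l.length := by
  induction l with
  | nil => simp
  | cons c t ih =>
    simp only [List.filter_cons, List.count_cons]
    by_cases h : c = ch <;> simp [h] at ih ⊢ <;> omega

theorem removedLen_count (s : String) (ch : Char) :
    pvRemovedLen s (String.ofList [ch]) = s.toList.count ch := by
  have hrep : (PySem.Str.replace s (String.ofList [ch]) "").toList
      = s.toList.filter (fun c => c ≠ ch) := by
    rw [PySem.Str.toList_replace]
    rw [show (String.ofList [ch]).toList = [ch] by simp]
    simpa using replace_single s.toList ch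
  have hlen : ∀ t : String, PySem.Str.len t = (t.toList.length : Int) := by
    intro t; simp [PySem.Str.len]
  simp only [pvRemovedLen, hlen, hrep]
  have := filter_ne_length s.toList ch
  omega

theorem intercalate_nil_sep (L : List (List Char)) :
    List.intercalate ([] : List Char) L = L.flatten := by
  induction L with
  | nil => rfl
  | cons x xs ih =>
    cases xs with
    | nil => simp [List.intercalate]
    | cons y ys =>
      simp only [List.intercalate, List.intersperse] at *
      simp_all

theorem join_empty_sep (parts : List String) :
    (PySem.Str.join "" parts).toList = parts.flatMap String.toList := by
  rw [PySem.Str.toList_join]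
  show PySem.Chars.join [] (parts.map String.toList) = _
  rw [PySem.Chars.join, intercalate_nil_sep]
  simp [List.flatMap]

-- ===== VERDICT (by name: the statement is the Claim_ definition above) =====
theorem countSolution_spec : Claim_equal_countSolution := by
  intro state _
  show countSolution state = countSolution_alt state
  simp only [countSolution, countSolution_alt, countSolution_outer]
  have h1 : pvRemovedLen (PySem.Str.join "" state) "|"
      = ((state.flatMap String.toList).count '|' : Int) := by
    rw [show ("|" : String) = String.ofList ['|'] from rfl, removedLen_count, join_empty_sep]
  have h2 : pvRemovedLen (PySem.Str.join "" state) "#"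
      = ((state.flatMap String.toList).count '#' : Int) := by
    rw [show ("#" : String) = String.ofList ['#'] from rfl, removedLen_count, join_empty_sep]
  simp [h1, h2]
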